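-- pv_equiv track=rewrite | github.com/Bdenouden/advent_of_code_2020 | day8/part2.py | changeXToY
-- ===== SOURCE A (Python) =====
-- def changeXToY(inst, jmpNum, X, Y):
--     count = 0
--     for i in inst:
--         if i['i'] == X:
--             if(count == jmpNum):
--                 i['i'] = Y
--                 break
--             count += 1
--     return inst
-- ===== SOURCE B (Python) =====
-- def changeXToY(inst, jmpNum, X, Y):
--     idxs = [k for k, d in enumerate(inst) if d['i'] == X]
--     if 0 <= jmpNum < len(idxs):
--         inst[idxs[jmpNum]]['i'] = Y
--     return inst
-- ===== Notes on version B (the rewrite author's own statement) =====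
-- stated objective: alternative
-- what changed: Replaces A's counter-scan with early break by collecting all indices of X-matching instructions in one enumerate-comprehension and then performing a single indexed update of the jmpNum-th one.
-- outside the precondition, e.g. on changeXToY([{'i': 'jmp'}, {}], 0, 'jmp', 'nop'): A returns [{'i': 'nop'}, {}], B raises KeyError
import Mathlib
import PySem

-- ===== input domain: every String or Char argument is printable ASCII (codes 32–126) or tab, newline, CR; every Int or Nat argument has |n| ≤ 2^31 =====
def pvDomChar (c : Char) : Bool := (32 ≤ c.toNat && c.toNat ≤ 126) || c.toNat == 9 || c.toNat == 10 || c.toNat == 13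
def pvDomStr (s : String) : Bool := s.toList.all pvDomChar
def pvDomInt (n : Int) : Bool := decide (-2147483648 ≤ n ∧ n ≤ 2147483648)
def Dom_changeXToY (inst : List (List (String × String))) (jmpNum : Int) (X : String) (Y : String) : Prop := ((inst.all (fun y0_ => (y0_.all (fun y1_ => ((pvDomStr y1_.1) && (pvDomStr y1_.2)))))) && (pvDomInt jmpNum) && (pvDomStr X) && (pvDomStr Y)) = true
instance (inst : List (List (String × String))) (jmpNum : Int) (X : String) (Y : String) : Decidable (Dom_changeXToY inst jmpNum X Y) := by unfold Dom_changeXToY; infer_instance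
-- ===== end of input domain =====

-- B replaces A's counter-scan-with-early-break by collect-all-match-indices-then-one-indexed-update
-- (objective: alternative decomposition, same cost). A and B mutate the matched dict in place; the
-- equivalence proved here is about the RETURN value (Python A returns the same mutated list object).

-- ===== PORT A =====
-- the for-loop with `count` and `break`; i['i'] lookup/assignment ported via PySem.Dict on the
-- assoc list (exact); a missing key 'i' is a KeyError in Python → the `none` branch stops the
-- scan with an arbitrary value, such inputs are excluded by Pre_.
def changeXToY_goA (jmpNum : Int) (X Y : String) :
    List (List (String × String)) → Int → List (List (String × String))
  | [], _ => []
  | i :: rest, count =>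
    match PySem.Dict.get? (PySem.Dict.mk i) "i" with
    | some v =>
      if v == X then
        if count == jmpNum then (PySem.Dict.insert (PySem.Dict.mk i) "i" Y).items :: rest
        else i :: changeXToY_goA jmpNum X Y rest (count + 1)
      else i :: changeXToY_goA jmpNum X Y rest count
    | none => i :: rest   -- KeyError in Python; outside Pre_

def changeXToY (inst : List (List (String × String))) (jmpNum : Int) (X : String) (Y : String) :
    List (List (String × String)) :=
  changeXToY_goA jmpNum X Y inst 0

-- ===== PORT B =====
-- the comprehension `[k for k, d in enumerate(inst) if d['i'] == X]`
def pvIdxs (X : String) (xs : List (List (String × String))) (s : Int) : List Int :=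
  ((PySem.List.enumerate xs s).filter
    (fun p => PySem.Dict.get? (PySem.Dict.mk p.2) "i" == some X)).map (fun p => p.1)

def changeXToY_alt (inst : List (List (String × String))) (jmpNum : Int) (X : String) (Y : String) :
    List (List (String × String)) :=
  let idxs := pvIdxs X inst 0
  if 0 ≤ jmpNum ∧ jmpNum < (idxs.length : Int) then
    match PySem.List.pyGet? idxs jmpNum with
    | some k =>
      match PySem.List.pyGet? inst k with       -- inst[idxs[jmpNum]]
      | some d => inst.set k.toNat ((PySem.Dict.insert (PySem.Dict.mk d) "i" Y).items)
      | none => inst                            -- unreachable: idxs holds valid indices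
    | none => inst                              -- unreachable: 0 ≤ jmpNum < len(idxs)
  else inst

-- ===== PRECONDITION & SPEC =====
-- Pre_ excludes lists containing a dict without key 'i': Python raises KeyError there (A on the
-- first keyless dict it scans, B on any keyless dict), and when the keyless dict lies after A's
-- early break A returns a value while B raises.
def Pre_changeXToY (inst : List (List (String × String))) (jmpNum : Int) (X : String) (Y : String) : Prop :=
  ∀ d ∈ inst, (PySem.Dict.get? (PySem.Dict.mk d) "i").isSome = true
instance (inst : List (List (String × String))) (jmpNum : Int) (X : String) (Y : String) :
    Decidable (Pre_changeXToY inst jmpNum X Y) := by unfold Pre_changeXToY; infer_instance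

def pvWitness_changeXToY : (List (List (String × String))) × Int × String × String :=
  ([[("i", "jmp")], [("i", "acc")], [("i", "jmp")]], 1, "jmp", "nop")

def Spec_changeXToY (inst : List (List (String × String))) (jmpNum : Int) (X : String) (Y : String) (out : List (List (String × String))) : Prop := out = changeXToY_alt inst jmpNum X Y
instance (inst : List (List (String × String))) (jmpNum : Int) (X : String) (Y : String) (out : List (List (String × String))) : Decidable (Spec_changeXToY inst jmpNum X Y out) := by unfold Spec_changeXToY; infer_instance

-- ===== CLAIM (what is proved, stated in full; the proofs are below) =====
def Claim_equal_changeXToY : Prop := ∀ (inst : List (List (String × String))) (jmpNum : Int) (X : String) (Y : String), Dom_changeXToY inst jmpNum X Y → Pre_changeXToY inst jmpNum X Y → Spec_changeXToY inst jmpNum X Y (changeXToY inst jmpNum X Y)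

-- ===== LEMMAS AND PROOFS =====

-- reference: "change the n-th X-instruction", recursing with a decreasing counter
def pvRef (X Y : String) : Int → List (List (String × String)) → List (List (String × String))
  | _, [] => []
  | n, d :: rest =>
    match PySem.Dict.get? (PySem.Dict.mk d) "i" with
    | some v =>
      if v == X then
        if n == 0 then (PySem.Dict.insert (PySem.Dict.mk d) "i" Y).items :: rest
        else d :: pvRef X Y (n - 1) rest
      else d :: pvRef X Y n rest
    | none => d :: rest

theorem pvGoA_eq_ref (X Y : String) (j : Int) :
    ∀ (inst : List (List (String × String))) (c : Int),
      changeXToY_goA j X Y inst c = pvRef X Y (j - c) inst := by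
  intro inst
  induction inst with
  | nil => intro c; rfl
  | cons d rest ih =>
    intro c
    simp only [changeXToY_goA, pvRef]
    cases h : PySem.Dict.get? (PySem.Dict.mk d) "i" with
    | none => rfl
    | some v =>
      by_cases hv : (v == X) = true
      · by_cases hc : c = j
        · have h1 : (c == j) = true := by simp [hc]
          have h2 : ((j - c) == 0) = true := by simp [hc]
          simp [hv, h1, h2]
        · have h1 : (c == j) = false := by simp [hc]
          have h2 : ((j - c) == 0) = false := by
            simp only [beq_eq_false_iff_ne, ne_eq]; omega
          have h3 : j - (c + 1) = j - c - 1 := by omega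
          simp [hv, h1, h2, ← h3, ih (c + 1)]
      · simp only [Bool.not_eq_true] at hv
        simp [hv, ih c]

theorem pvIdxs_cons (X : String) (d : List (String × String))
    (rest : List (List (String × String))) (s : Int) :
    pvIdxs X (d :: rest) s =
      (if PySem.Dict.get? (PySem.Dict.mk d) "i" == some X then [s] else []) ++
        pvIdxs X rest (s + 1) := by
  simp only [pvIdxs, PySem.List.enumerate_cons, List.filter_cons]
  split <;> simp

theorem pvIdxs_shift (X : String) :
    ∀ (xs : List (List (String × String))) (s : Int),
      pvIdxs X xs (s + 1) = (pvIdxs X xs s).map (· + 1) := by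
  intro xs
  induction xs with
  | nil => intro s; rfl
  | cons d rest ih =>
    intro s
    rw [pvIdxs_cons, pvIdxs_cons, ih (s + 1)]
    split <;> simp

theorem pvIdxs_mem_range (X : String) :
    ∀ (xs : List (List (String × String))) (s : Int) (k : Int),
      k ∈ pvIdxs X xs s → s ≤ k ∧ k < s + xs.length := by
  intro xs
  induction xs with
  | nil => intro s k hk; simp [pvIdxs] at hk
  | cons d rest ih =>
    intro s k hk
    rw [pvIdxs_cons] at hk
    rcases List.mem_append.mp hk with h | h
    · split at h
      · simp at h; subst h
        simp only [List.length_cons]; push_cast; omega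
      · simp at h
    · have := ih (s + 1) k h
      simp only [List.length_cons]
      constructor <;> [omega; (push_cast; omega)]

-- unfolds one cons step of B: in-range → set at the found index, else unchanged
theorem pvAlt_in_range (X Y : String) (inst : List (List (String × String))) (j : Int)
    (h0 : 0 ≤ j) (h1 : j < ((pvIdxs X inst 0).length : Int)) :
    changeXToY_alt inst j X Y =
      (match PySem.List.pyGet? (pvIdxs X inst 0) j with
       | some k =>
         match PySem.List.pyGet? inst k with
         | some d => inst.set k.toNat ((PySem.Dict.insert (PySem.Dict.mk d) "i" Y).items)
         | none => inst
       | none => inst) := by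
  simp only [changeXToY_alt, if_pos (And.intro h0 h1)]

theorem pvAlt_out_range (X Y : String) (inst : List (List (String × String))) (j : Int)
    (h : ¬ (0 ≤ j ∧ j < ((pvIdxs X inst 0).length : Int))) :
    changeXToY_alt inst j X Y = inst := by
  simp only [changeXToY_alt, if_neg h]

theorem pvAlt_eq_ref (X Y : String) :
    ∀ (inst : List (List (String × String))),
      (∀ d ∈ inst, (PySem.Dict.get? (PySem.Dict.mk d) "i").isSome = true) →
      ∀ (j : Int), changeXToY_alt inst j X Y = pvRef X Y j inst := by
  intro inst
  induction inst with
  | nil =>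
    intro _ j
    rw [pvAlt_out_range X Y [] j (by
      intro hc
      have h : pvIdxs X [] 0 = [] := rfl
      rw [h] at hc
      simp only [List.length_nil, Nat.cast_zero] at hc
      omega)]
    rfl
  | cons d rest ih =>
    intro hpre j
    have hd := hpre d List.mem_cons_self
    obtain ⟨v, hv⟩ : ∃ v, PySem.Dict.get? (PySem.Dict.mk d) "i" = some v := by
      cases h : PySem.Dict.get? (PySem.Dict.mk d) "i" with
      | none => rw [h] at hd; simp at hd
      | some v => exact ⟨v, rfl⟩
    have hIH := ih (fun d' h' => hpre d' (List.mem_cons_of_mem _ h'))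
    by_cases hvx : (v == X) = true
    · -- head matches X
      have hidx : pvIdxs X (d :: rest) 0 = 0 :: (pvIdxs X rest 0).map (· + 1) := by
        rw [pvIdxs_cons, pvIdxs_shift X rest 0]
        simp [hv, hvx]
      by_cases hj : j = 0
      · subst hj
        rw [pvAlt_in_range X Y _ 0 le_rfl
          (by rw [hidx]; simp only [List.length_cons]; push_cast; omega)]
        rw [hidx, PySem.List.pyGet?_zero_cons]
        simp only [PySem.List.pyGet?_zero_cons]
        simp [pvRef, hv, hvx]
      · -- j ≠ 0 : ref peels the head, B's index shifts down by one
        have href : pvRef X Y j (d :: rest) = d :: pvRef X Y (j - 1) rest := by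
          have hb : (j == 0) = false := by simp [hj]
          simp [pvRef, hv, hvx, hb]
        rw [href, ← hIH (j - 1)]
        by_cases hr : 0 ≤ j - 1 ∧ j - 1 < ((pvIdxs X rest 0).length : Int)
        · obtain ⟨hr0, hr1⟩ := hr
          have hjnat : (j - 1).toNat < (pvIdxs X rest 0).length := by omega
          obtain ⟨k0, hget⟩ : ∃ k0, PySem.List.pyGet? (pvIdxs X rest 0) (j - 1) = some k0 :=
            ⟨_, PySem.List.pyGet?_eq_some_getElem _ hr0 hr1⟩
          have hk0mem : k0 ∈ pvIdxs X rest 0 := PySem.List.mem_of_pyGet?_eq_some _ hget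
          obtain ⟨hk0a, hk0b⟩ := pvIdxs_mem_range X rest 0 k0 hk0mem
          have hk0lt : k0.toNat < rest.length := by omega
          obtain ⟨e, hgetr⟩ : ∃ e, PySem.List.pyGet? rest k0 = some e :=
            ⟨_, PySem.List.pyGet?_eq_some_getElem _ hk0a (by push_cast; omega)⟩
          rw [pvAlt_in_range X Y rest (j - 1) hr0 hr1]
          simp only [hget, hgetr]
          rw [pvAlt_in_range X Y (d :: rest) j (by omega)
            (by rw [hidx]; simp only [List.length_cons, List.length_map]; push_cast; omega)]
          rw [hidx]
          have hget' : (pvIdxs X rest 0)[(j - 1).toNat]? = some k0 := by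
            rw [PySem.List.pyGet?_of_nonneg _ hr0] at hget; exact hget
          have hgetr' : rest[k0.toNat]? = some e := by
            rw [PySem.List.pyGet?_of_nonneg _ hk0a] at hgetr; exact hgetr
          have hjget : PySem.List.pyGet? (0 :: (pvIdxs X rest 0).map (· + 1)) j
              = some (k0 + 1) := by
            rw [PySem.List.pyGet?_of_nonneg _ (by omega : (0:Int) ≤ j)]
            have h2 : j.toNat = (j - 1).toNat + 1 := by omega
            rw [h2, List.getElem?_cons_succ, List.getElem?_map, hget']
            rfl
          have hkget : PySem.List.pyGet? (d :: rest) (k0 + 1) = some e := by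
            rw [PySem.List.pyGet?_of_nonneg _ (by omega : (0:Int) ≤ k0 + 1)]
            have h2 : (k0 + 1).toNat = k0.toNat + 1 := by omega
            rw [h2, List.getElem?_cons_succ, hgetr']
          simp only [hjget, hkget]
          have h2 : (k0 + 1).toNat = k0.toNat + 1 := by omega
          rw [h2]
          rfl
        · rw [pvAlt_out_range X Y rest (j - 1) hr,
            pvAlt_out_range X Y (d :: rest) j
              (by rw [hidx]; simp only [List.length_cons, List.length_map]; push_cast; omega)]
    · -- head does not match X
      have hvx' : (v == X) = false := by simp_all
      have hidx : pvIdxs X (d :: rest) 0 = (pvIdxs X rest 0).map (· + 1) := by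
        rw [pvIdxs_cons, pvIdxs_shift X rest 0]
        simp [hv, hvx']
      have href : pvRef X Y j (d :: rest) = d :: pvRef X Y j rest := by
        simp [pvRef, hv, hvx']
      rw [href, ← hIH j]
      by_cases hr : 0 ≤ j ∧ j < ((pvIdxs X rest 0).length : Int)
      · obtain ⟨hr0, hr1⟩ := hr
        have hjnat : j.toNat < (pvIdxs X rest 0).length := by omega
        obtain ⟨k0, hget⟩ : ∃ k0, PySem.List.pyGet? (pvIdxs X rest 0) j = some k0 :=
          ⟨_, PySem.List.pyGet?_eq_some_getElem _ hr0 hr1⟩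
        have hk0mem : k0 ∈ pvIdxs X rest 0 := PySem.List.mem_of_pyGet?_eq_some _ hget
        obtain ⟨hk0a, hk0b⟩ := pvIdxs_mem_range X rest 0 k0 hk0mem
        have hk0lt : k0.toNat < rest.length := by omega
        obtain ⟨e, hgetr⟩ : ∃ e, PySem.List.pyGet? rest k0 = some e :=
          ⟨_, PySem.List.pyGet?_eq_some_getElem _ hk0a (by push_cast; omega)⟩
        rw [pvAlt_in_range X Y rest j hr0 hr1]
        simp only [hget, hgetr]
        rw [pvAlt_in_range X Y (d :: rest) j hr0
          (by rw [hidx]; simp only [List.length_map]; exact hr1)]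
        rw [hidx]
        have hget' : (pvIdxs X rest 0)[j.toNat]? = some k0 := by
          rw [PySem.List.pyGet?_of_nonneg _ hr0] at hget; exact hget
        have hgetr' : rest[k0.toNat]? = some e := by
          rw [PySem.List.pyGet?_of_nonneg _ hk0a] at hgetr; exact hgetr
        have hjget : PySem.List.pyGet? ((pvIdxs X rest 0).map (· + 1)) j
            = some (k0 + 1) := by
          rw [PySem.List.pyGet?_of_nonneg _ hr0, List.getElem?_map, hget']
          rfl
        have hkget : PySem.List.pyGet? (d :: rest) (k0 + 1) = some e := by
          rw [PySem.List.pyGet?_of_nonneg _ (by omega : (0:Int) ≤ k0 + 1)]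
          have h2 : (k0 + 1).toNat = k0.toNat + 1 := by omega
          rw [h2, List.getElem?_cons_succ, hgetr']
        simp only [hjget, hkget]
        have h2 : (k0 + 1).toNat = k0.toNat + 1 := by omega
        rw [h2]
        rfl
      · rw [pvAlt_out_range X Y rest j hr,
          pvAlt_out_range X Y (d :: rest) j
            (by rw [hidx]; simp only [List.length_map]; exact hr)]

-- ===== VERDICT (by name: the statement is the Claim_ definition above) =====
theorem changeXToY_spec : Claim_equal_changeXToY := by
  intro inst jmpNum X Y _ hpre
  unfold Spec_changeXToY changeXToY
  rw [pvAlt_eq_ref X Y inst hpre jmpNum, pvGoA_eq_ref X Y jmpNum inst 0]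
  norm_num
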